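-- pv_equiv track=rewrite | github.com/sdbuch/spring2024-assignment1-basics | cs336_basics/tokenizer/tokenizer.py | find_partial_special_token_match
-- ===== SOURCE A (Python) =====
-- from typing import Any, Callable, Dict, Iterable, Iterator, List, Optional, Set, Tuple
--
-- def find_partial_special_token_match(text: str, special_tokens: List[str]) -> int:
--     """
--     Check if the end of text partially matches any special token.
--     Returns the number of additional characters needed to complete the potential match.
--     """
--     if not special_tokens:
--         return 0
--
--     # Sort special tokens by length in descending order
--     sorted_tokens = sorted(special_tokens, key=len, reverse=True)
--     max_token_len = len(sorted_tokens[0])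
--
--     # Check for partial matches at the end of the text
--     for i in range(min(max_token_len, len(text))):
--         suffix = text[-(i + 1) :]
--         for token in sorted_tokens:
--             if token.startswith(suffix):
--                 # Return how many more characters we need
--                 return len(token) - len(suffix)
--     return 0
-- ===== SOURCE B (Python) =====
-- def find_partial_special_token_match(text, special_tokens):
--     # Build prefix -> max token length once, then one dict lookup per suffix length.
--     best = {}
--     max_len = 0
--     for t in special_tokens:
--         n = len(t)
--         if max_len < n:
--             max_len = n
--         for p in range(1, n + 1):
--             pre = t[:p]
--             if best.get(pre, 0) < n:
--                 best[pre] = n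
--     for L in range(1, min(max_len, len(text)) + 1):
--         m = best.get(text[-L:], 0)
--         if m != 0:
--             return m - L
--     return 0
-- ===== Notes on version B (the rewrite author's own statement) =====
-- stated objective: alternative
-- what changed: Instead of sorting the tokens by length and rescanning that sorted list for every candidate suffix, B precomputes one dictionary mapping each nonempty token prefix to the maximum length of a token with that prefix, so each candidate suffix length costs a single lookup; the length-descending sort disappears entirely.
import Mathlib
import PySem

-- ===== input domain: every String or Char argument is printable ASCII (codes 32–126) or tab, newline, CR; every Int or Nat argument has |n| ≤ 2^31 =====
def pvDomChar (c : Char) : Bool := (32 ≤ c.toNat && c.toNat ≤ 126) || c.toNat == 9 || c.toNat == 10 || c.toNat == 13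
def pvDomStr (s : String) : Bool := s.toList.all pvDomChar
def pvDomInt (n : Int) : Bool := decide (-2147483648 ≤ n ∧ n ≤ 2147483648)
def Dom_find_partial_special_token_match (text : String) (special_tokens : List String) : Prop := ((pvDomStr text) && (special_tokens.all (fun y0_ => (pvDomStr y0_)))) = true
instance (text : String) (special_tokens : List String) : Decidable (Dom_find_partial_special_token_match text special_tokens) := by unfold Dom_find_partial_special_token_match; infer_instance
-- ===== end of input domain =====

-- B replaces A's per-suffix scan of the length-sorted token list by a prefix → max-token-length
-- dictionary built once, so each candidate suffix is a single dictionary lookup (objective: alternative).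

-- ===== PORT A =====
-- outer 'for i in range(...)' with early return; the inner
-- 'for token in sorted_tokens: if token.startswith(suffix): return …' is the first match (find?)
def fpALoop (text : String) (sorted_tokens : List String) : List Int → Int
  | [] => 0
  | i :: rest =>
    let suffix := PySem.Str.slice text (some (-(i + 1))) none
    match sorted_tokens.find? (fun token => PySem.Str.startswith token suffix) with
    | some token => PySem.Str.len token - PySem.Str.len suffix
    | none => fpALoop text sorted_tokens rest

def find_partial_special_token_match (text : String) (special_tokens : List String) : Int :=
  if special_tokens = [] then 0
  else
    let sorted_tokens := PySem.List.sorted special_tokens (fun t => PySem.Str.len t) true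
    match PySem.List.pyGet? sorted_tokens 0 with    -- sorted_tokens[0]; always 'some': nonempty here
    | none => 0
    | some h =>
      let max_token_len : Int := PySem.Str.len h
      fpALoop text sorted_tokens
        (PySem.List.pyRange 0 (min max_token_len (PySem.Str.len text)) 1)

-- ===== PORT B =====
-- dict-building inner loop for one token: best[t[:p]] = max(best.get(t[:p],0), len(t)), p = 1..len(t)
def fpBStepD (d : PySem.Dict String Int) (t : String) : PySem.Dict String Int :=
  (PySem.List.pyRange 1 (PySem.Str.len t + 1) 1).foldl
    (fun d p =>
      let pre := PySem.Str.slice t none (some p)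
      if d.getD pre 0 < PySem.Str.len t then d.insert pre (PySem.Str.len t) else d) d

-- 'if max_len < n: max_len = n'
def fpBStepM (m : Int) (t : String) : Int :=
  if m < PySem.Str.len t then PySem.Str.len t else m

-- 'for L in range(1, …): m = best.get(text[-L:], 0); if m != 0: return m - L'
def fpBLoop (text : String) (best : PySem.Dict String Int) : List Int → Int
  | [] => 0
  | L :: rest =>
    let m := best.getD (PySem.Str.slice text (some (-L)) none) 0
    if m ≠ 0 then m - L else fpBLoop text best rest

def find_partial_special_token_match_alt (text : String) (special_tokens : List String) : Int :=
  let acc := special_tokens.foldl (fun acc t => (fpBStepD acc.1 t, fpBStepM acc.2 t))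
    (PySem.Dict.empty, 0)
  fpBLoop text acc.1
    (PySem.List.pyRange 1 (min acc.2 (PySem.Str.len text) + 1) 1)

-- ===== PRECONDITION & SPEC =====
def Spec_find_partial_special_token_match (text : String) (special_tokens : List String) (out : Int) : Prop := out = find_partial_special_token_match_alt text special_tokens
instance (text : String) (special_tokens : List String) (out : Int) : Decidable (Spec_find_partial_special_token_match text special_tokens out) := by unfold Spec_find_partial_special_token_match; infer_instance

-- ===== CLAIM (what is proved, stated in full; the proofs are below) =====
def Claim_equal_find_partial_special_token_match : Prop := ∀ (text : String) (special_tokens : List String), Dom_find_partial_special_token_match text special_tokens → Spec_find_partial_special_token_match text special_tokens (find_partial_special_token_match text special_tokens)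

-- ===== LEMMAS AND PROOFS =====

-- one token's inner dict loop over an arbitrary index list, looked up at any key s
theorem fpB_innerFold (t : String) (n : Int) (ps : List Int) (d : PySem.Dict String Int) (s : String) :
    (ps.foldl (fun d p =>
      let pre := PySem.Str.slice t none (some p)
      if d.getD pre 0 < n then d.insert pre n else d) d).getD s 0 =
    if ∃ p ∈ ps, PySem.Str.slice t none (some p) = s then max (d.getD s 0) n else d.getD s 0 := by
  induction ps generalizing d with
  | nil => simp
  | cons p ps ih =>
    simp only [List.foldl_cons, ih]
    by_cases hs : PySem.Str.slice t none (some p) = s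
    · have h1 : (if d.getD (PySem.Str.slice t none (some p)) 0 < n
          then d.insert (PySem.Str.slice t none (some p)) n else d).getD s 0 = max (d.getD s 0) n := by
        rw [hs]; split
        · rename_i hlt; rw [PySem.Dict.getD_insert, if_pos rfl]; omega
        · rename_i hlt; omega
      rw [h1]
      have hc : ∃ q ∈ p :: ps, PySem.Str.slice t none (some q) = s := ⟨p, List.mem_cons_self, hs⟩
      rw [if_pos hc]
      split <;> omega
    · have h1 : (if d.getD (PySem.Str.slice t none (some p)) 0 < n
          then d.insert (PySem.Str.slice t none (some p)) n else d).getD s 0 = d.getD s 0 := by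
        split
        · rw [PySem.Dict.getD_insert]; simp [Ne.symm hs]
        · rfl
      rw [h1]
      have hiff : (∃ q ∈ p :: ps, PySem.Str.slice t none (some q) = s) ↔
          (∃ q ∈ ps, PySem.Str.slice t none (some q) = s) := by
        simp only [List.mem_cons]
        constructor
        · rintro ⟨q, hq, he⟩
          rcases hq with rfl | hq
          · exact absurd he hs
          · exact ⟨q, hq, he⟩
        · rintro ⟨q, hq, he⟩
          exact ⟨q, Or.inr hq, he⟩
      rw [if_congr hiff rfl rfl]

theorem slice_to_toList (t : String) (p : Int) (h0 : 0 ≤ p) :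
    (PySem.Str.slice t none (some p)).toList = t.toList.take p.toNat := by
  simp [PySem.Str.slice]
  exact PySem.List.slice_to _ h0

-- t[:p] = s for some p in range(1, len(t)+1)  ⟺  s is a nonempty prefix of t
theorem prefix_exists (t s : String) :
    (∃ p ∈ PySem.List.pyRange 1 (PySem.Str.len t + 1) 1, PySem.Str.slice t none (some p) = s)
      ↔ (s.toList ≠ [] ∧ s.toList <+: t.toList) := by
  have hlt := PySem.Str.len_eq t
  constructor
  · rintro ⟨p, hp, he⟩
    rw [PySem.List.mem_pyRange_one] at hp
    have h0 : (0:Int) ≤ p := by omega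
    have hlist : s.toList = t.toList.take p.toNat := by
      rw [← he]; exact slice_to_toList t p h0
    have hlens : s.toList.length = p.toNat := by
      rw [hlist, List.length_take]; omega
    refine ⟨?_, hlist ▸ List.take_prefix _ _⟩
    intro hnil
    rw [hnil] at hlens; simp at hlens; omega
  · rintro ⟨hne, hpre⟩
    refine ⟨(s.toList.length : Int), ?_, ?_⟩
    · rw [PySem.List.mem_pyRange_one]
      have h1 : 1 ≤ s.toList.length := List.length_pos_iff.mpr hne
      have h2 : s.toList.length ≤ t.toList.length := hpre.length_le
      omega
    · apply String.toList_inj.mp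
      rw [slice_to_toList t _ (by positivity), Int.toNat_natCast]
      exact (List.prefix_iff_eq_take.mp hpre).symm

-- the dictionary after one token, looked up at any key s
theorem fpBStepD_getD (t : String) (d : PySem.Dict String Int) (s : String) :
    (fpBStepD d t).getD s 0 =
      if s.toList ≠ [] ∧ s.toList <+: t.toList
      then max (d.getD s 0) (PySem.Str.len t) else d.getD s 0 := by
  unfold fpBStepD
  rw [fpB_innerFold]
  rw [if_congr (prefix_exists t s) rfl rfl]

-- the full dictionary looked up at s: running max of lengths of the tokens having s as nonempty prefix
theorem fpB_dictFold_getD (tokens : List String) (d : PySem.Dict String Int) (s : String) :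
    (tokens.foldl fpBStepD d).getD s 0 =
      (tokens.filter (fun t => decide (s.toList ≠ [] ∧ s.toList <+: t.toList))).foldl
        (fun acc t => max acc (PySem.Str.len t)) (d.getD s 0) := by
  induction tokens generalizing d with
  | nil => simp
  | cons t ts ih =>
    rw [List.foldl_cons, ih, fpBStepD_getD, List.filter_cons]
    by_cases hc : s.toList ≠ [] ∧ s.toList <+: t.toList
    · rw [if_pos hc, if_pos (by simpa using hc), List.foldl_cons]
    · rw [if_neg hc, if_neg (by simpa using hc)]

-- first satisfier in the descending-by-length sort has maximal length among all satisfiers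
theorem find?_len_max {l : List String} {p : String → Bool} {t : String}
    (hp : l.Pairwise (fun a b => PySem.Str.len b ≤ PySem.Str.len a))
    (h : l.find? p = some t) : ∀ u ∈ l, p u = true → PySem.Str.len u ≤ PySem.Str.len t := by
  induction l with
  | nil => simp at h
  | cons a l ih =>
    by_cases hpa : p a = true
    · rw [List.find?_cons_of_pos hpa] at h
      cases h
      intro u hu _
      rcases List.mem_cons.mp hu with rfl | hu
      · exact le_refl _
      · exact (List.pairwise_cons.mp hp).1 u hu
    · rw [List.find?_cons_of_neg hpa] at h
      intro u hu hpu
      rcases List.mem_cons.mp hu with rfl | hu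
      · exact absurd hpu hpa
      · exact ih (List.pairwise_cons.mp hp).2 h u hu hpu

-- B's dictionary value at a nonempty suffix s, given what A's inner scan found there
theorem best_of_find?_none (tokens : List String) (s : String)
    (h : (PySem.List.sorted tokens (fun t => PySem.Str.len t) true).find?
        (fun token => PySem.Str.startswith token s) = none) :
    (tokens.foldl fpBStepD PySem.Dict.empty).getD s 0 = 0 := by
  rw [fpB_dictFold_getD, PySem.Dict.getD_empty]
  have hfil : tokens.filter (fun t => decide (s.toList ≠ [] ∧ s.toList <+: t.toList)) = [] := by
    rw [List.filter_eq_nil_iff]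
    intro t ht
    have hmem : t ∈ PySem.List.sorted tokens (fun t => PySem.Str.len t) true :=
      (PySem.List.mem_sorted ..).mpr ht
    have := List.find?_eq_none.mp h t hmem
    simp only [PySem.Str.startswith_eq] at this
    simp only [decide_eq_true_eq, not_and]
    intro _ hpre
    exact this ((PySem.Chars.startswith_iff ..).mpr hpre)
  rw [hfil]; rfl

theorem best_of_find?_some (tokens : List String) (s : String) (tok : String)
    (hne : s.toList ≠ [])
    (h : (PySem.List.sorted tokens (fun t => PySem.Str.len t) true).find?
        (fun token => PySem.Str.startswith token s) = some tok) :
    (tokens.foldl fpBStepD PySem.Dict.empty).getD s 0 = PySem.Str.len tok ∧ 1 ≤ PySem.Str.len tok := by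
  have hptok : PySem.Str.startswith tok s = true := by simpa using List.find?_some h
  have hpre : s.toList <+: tok.toList := by
    rw [PySem.Str.startswith_eq] at hptok
    exact (PySem.Chars.startswith_iff ..).mp hptok
  have hlen1 : 1 ≤ PySem.Str.len tok := by
    have h1 : 1 ≤ s.toList.length := List.length_pos_iff.mpr hne
    have h2 := hpre.length_le
    have := PySem.Str.len_eq tok
    omega
  have htok : tok ∈ tokens := (PySem.List.mem_sorted ..).mp (List.mem_of_find?_eq_some h)
  rw [fpB_dictFold_getD, PySem.Dict.getD_empty]
  set fil := tokens.filter (fun t => decide (s.toList ≠ [] ∧ s.toList <+: t.toList)) with hfil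
  have hmax : ∀ u ∈ tokens, (s.toList <+: u.toList) → PySem.Str.len u ≤ PySem.Str.len tok := by
    intro u hu hupre
    exact find?_len_max (PySem.List.sorted_pairwise_rev ..) h u ((PySem.List.mem_sorted ..).mpr hu)
      (by rw [PySem.Str.startswith_eq]; exact (PySem.Chars.startswith_iff ..).mpr hupre)
  have hfold : fil.foldl (fun acc t => max acc (PySem.Str.len t)) 0
      = (fil.map PySem.Str.len).foldl max 0 := List.foldl_map.symm
  refine ⟨?_, hlen1⟩
  rw [hfold]
  have hge : PySem.Str.len tok ≤ (fil.map PySem.Str.len).foldl max 0 := by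
    refine (PySem.List.le_foldl_max _ _).2 _ (List.mem_map_of_mem ?_)
    rw [hfil, List.mem_filter]
    exact ⟨htok, by simp [hne, hpre]⟩
  rcases PySem.List.foldl_max_mem (fil.map PySem.Str.len) 0 with h0 | hmem
  · omega
  · rcases List.mem_map.mp hmem with ⟨u, hu, hlu⟩
    rw [hfil, List.mem_filter] at hu
    have := hmax u hu.1 (by simpa using (of_decide_eq_true hu.2).2)
    omega

-- the two early-return loops agree, step by step
theorem loop_eq (text : String) (tokens : List String) :
    ∀ (fuel j : Nat) (m : Int), m ≤ PySem.Str.len text → (m - j).toNat ≤ fuel →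
    fpALoop text (PySem.List.sorted tokens (fun t => PySem.Str.len t) true)
        (PySem.List.pyRange (j : Int) m 1)
      = fpBLoop text (tokens.foldl fpBStepD PySem.Dict.empty)
        (PySem.List.pyRange ((j : Int) + 1) (m + 1) 1) := by
  intro fuel
  induction fuel with
  | zero =>
    intro j m hm h0
    rw [PySem.List.pyRange_one_eq_nil (by omega), PySem.List.pyRange_one_eq_nil (by omega)]
    rfl
  | succ fuel ih =>
    intro j m hm hfuel
    by_cases hjm : (j : Int) < m
    · rw [PySem.List.pyRange_one_cons hjm, PySem.List.pyRange_one_cons (by omega : (j:Int)+1 < m+1)]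
      simp only [fpALoop, fpBLoop]
      have htext := PySem.Str.len_eq text
      have hcast : (-((j:Int) + 1)) = -(((j+1 : Nat) : Int)) := by push_cast; ring
      set s := PySem.Str.slice text (some (-((j:Int) + 1))) none with hsdef
      have hslist : s.toList = text.toList.drop (text.toList.length - (j+1)) := by
        rw [hsdef, hcast, PySem.Str.toList_slice, PySem.Chars.slice_eq_listSlice]
        exact PySem.List.slice_from_neg_natCast text.toList (j+1) (by omega)
      have hslen : s.toList.length = j + 1 := by
        rw [hslist, List.length_drop]; omega
      have hsne : s.toList ≠ [] := by
        intro hnil; rw [hnil] at hslen; simp at hslen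
      have hlens : PySem.Str.len s = (j : Int) + 1 := by
        have := PySem.Str.len_eq s; omega
      cases hfind : (PySem.List.sorted tokens (fun t => PySem.Str.len t) true).find?
          (fun token => PySem.Str.startswith token s) with
      | none =>
        have hbest := best_of_find?_none tokens s hfind
        simp only [hbest]
        simp only [ne_eq, not_true_eq_false, if_false]
        have := ih (j+1) m hm (by omega)
        push_cast at this ⊢
        exact this
      | some tok =>
        obtain ⟨hbest, h1⟩ := best_of_find?_some tokens s tok hsne hfind
        simp only [hbest, hlens]
        rw [if_pos (by omega)]
    · rw [PySem.List.pyRange_one_eq_nil (by omega), PySem.List.pyRange_one_eq_nil (by omega)]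
      rfl

-- running max of token lengths = length of the head of the descending sort
theorem maxlen_eq (tokens : List String) (h : String) (tl : List String)
    (hs : PySem.List.sorted tokens (fun t => PySem.Str.len t) true = h :: tl) :
    tokens.foldl fpBStepM 0 = PySem.Str.len h := by
  have hstep : tokens.foldl fpBStepM 0 = tokens.foldl (fun acc t => max acc (PySem.Str.len t)) 0 := by
    apply PySem.List.foldl_congr_mem
    intro acc t _
    unfold fpBStepM; omega
  have hmap : tokens.foldl (fun acc t => max acc (PySem.Str.len t)) 0
      = (tokens.map PySem.Str.len).foldl max 0 := List.foldl_map.symm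
  have hh : h ∈ tokens := (PySem.List.mem_sorted ..).mp (hs ▸ List.mem_cons_self ..)
  have hge : PySem.Str.len h ≤ (tokens.map PySem.Str.len).foldl max 0 :=
    (PySem.List.le_foldl_max _ _).2 _ (List.mem_map_of_mem hh)
  have hub := PySem.List.key_head_sorted_rev_ge tokens (fun t => PySem.Str.len t) hs
  rw [hstep, hmap]
  rcases PySem.List.foldl_max_mem (tokens.map PySem.Str.len) 0 with h0 | hmem
  · have hpos := PySem.Str.len_eq h
    have : 0 ≤ PySem.Str.len h := by omega
    omega
  · rcases List.mem_map.mp hmem with ⟨u, hu, hlu⟩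
    have h2 : PySem.Str.len u ≤ PySem.Str.len h := hub u hu
    omega

-- ===== VERDICT (by name: the statement is the Claim_ definition above) =====
theorem find_partial_special_token_match_spec : Claim_equal_find_partial_special_token_match := by
  unfold Claim_equal_find_partial_special_token_match
  intro text special_tokens _
  unfold Spec_find_partial_special_token_match
  unfold find_partial_special_token_match find_partial_special_token_match_alt
  rw [PySem.List.foldl_prod_mk (f := fpBStepD) (g := fpBStepM)]
  by_cases hnil : special_tokens = []
  · subst hnil
    simp only [List.foldl_nil]
    have hlen := PySem.Str.len_eq text
    have hmin : min (0:Int) (PySem.Str.len text) = 0 := by omega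
    rw [hmin, PySem.List.pyRange_one_eq_nil (by omega)]
    rfl
  · rw [if_neg hnil]
    rcases hsort : PySem.List.sorted special_tokens (fun t => PySem.Str.len t) true with _ | ⟨h, tl⟩
    · exact absurd ((PySem.List.sorted_eq_nil_iff ..).mp hsort) hnil
    · have hget : PySem.List.pyGet? (h :: tl) (0:Int) = some h := by simp [PySem.List.pyGet?, PySem.List.pyIdx?]
      simp only [hget]
      rw [maxlen_eq special_tokens h tl hsort]
      have hloop := loop_eq text special_tokens
        (min (PySem.Str.len h) (PySem.Str.len text) + 1).toNat 0
        (min (PySem.Str.len h) (PySem.Str.len text))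
        (by omega) (by omega)
      simpa using (hsort ▸ hloop)
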